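-- pv_equiv track=rewrite | github.com/pedrofariacomposer/comptools | build/lib/comptools/basic_tools.py | inversion
-- ===== SOURCE A (Python) =====
-- from typing import Dict, Sequence, List
--
-- def interval_class(
--     pitch1: int,
--     pitch2: int,
-- ) -> int:
--     """Finds the interval class between two pitches or pitch-classes.
--     """
--
--     diff_mod_12 = abs(pitch1 - pitch2) % 12
--     if diff_mod_12 > 6:
--         diff_mod_12 = 12 - diff_mod_12
--
--     return diff_mod_12
--
-- def transposition(
--     pitches: Sequence,
--     transposing_factor: int,
-- ) -> List:
--
--     """Transposes a sequence of MIDI pitches or pitch classes.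
--     """
--     result = []
--     for p in pitches:
--         result.append(p + transposing_factor)
--     if max(pitches) <= 11:
--         result = [x % 12 for x in result]
--     return result
--
-- def intervals(
--     pitches: Sequence,
--     icclass: bool = False,
-- ) -> List:
--
--     """Finds the interval sequence of a sequence of MIDI pitches or pitch classes.
--     """
--
--     if max(pitches) <= 11:
--         if icclass == True:
--             return[interval_class(pitches[i+1],pitches[i]) for i in range(len(pitches)-1)]
--         else:
--             return [(pitches[i+1]-pitches[i]) % 12 for i in range(len(pitches)-1)]
--     else:
--         return [pitches[i+1]-pitches[i] for i in range(len(pitches)-1)]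
--
-- def start_sequence_pitches(
--     first_pitch: int,
--     interval_sequence: List,
-- ) -> List:
--
--     """"Given a first pitch and an interval sequence, creates a pitch sequence.
--     """
--
--     new_sequence = [first_pitch]
--     for interval in interval_sequence:
--         new_pitch = new_sequence[-1] + interval
--         new_sequence.append(new_pitch)
--
--     return new_sequence
--
-- def inversion(
--     pitches: Sequence,
--     factor: int = 0
-- ) -> List:
--
--     """Inverts a sequence of pitch classes or a sequence of MIDI pitches.
--     """
--
--     if max(pitches) <= 11:
--         return transposition([(12-pitch_class) % 12 for pitch_class in pitches],factor)
--     else: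
--         intervals_pitches = [-x for x in intervals(pitches)]
--         return start_sequence_pitches(pitches[0],intervals_pitches)
-- ===== SOURCE B (Python) =====
-- def inversion(pitches, factor=0):
--     if max(pitches) <= 11:
--         return [((12 - p) % 12 + factor) % 12 for p in pitches]
--     return [2 * pitches[0] - p for p in pitches]
-- ===== Notes on version B (the rewrite author's own statement) =====
-- stated objective: simpler
-- what changed: B replaces A's pipeline (map to (12-p)%12 then helper transposition with its own max-test, or intervals list -> negation -> cumulative start_sequence rebuild) by one closed-form per-element expression in each branch: ((12-p)%12+factor)%12 for pitch classes and twice the first pitch minus p for MIDI pitches.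
import Mathlib
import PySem

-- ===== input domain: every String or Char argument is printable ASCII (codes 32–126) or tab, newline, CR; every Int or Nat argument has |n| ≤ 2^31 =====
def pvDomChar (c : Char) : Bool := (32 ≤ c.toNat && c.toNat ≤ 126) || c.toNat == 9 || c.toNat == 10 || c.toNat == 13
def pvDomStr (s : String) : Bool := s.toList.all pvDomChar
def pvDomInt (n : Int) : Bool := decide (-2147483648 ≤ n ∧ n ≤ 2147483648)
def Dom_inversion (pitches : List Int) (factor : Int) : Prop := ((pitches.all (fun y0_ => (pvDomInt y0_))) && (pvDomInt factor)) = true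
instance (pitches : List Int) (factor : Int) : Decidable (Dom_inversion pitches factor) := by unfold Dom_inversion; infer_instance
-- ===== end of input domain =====

-- B: one closed-form per-element expression per branch replaces A's transposition/intervals/rebuild pipeline (simpler; same O(n)).


-- ===== PORT A =====
def interval_class (pitch1 pitch2 : Int) : Int :=
  let diff_mod_12 := PySem.Int.mod |pitch1 - pitch2| 12
  if diff_mod_12 > 6 then 12 - diff_mod_12 else diff_mod_12

def transposition (pitches : List Int) (transposing_factor : Int) : List Int :=
  let result := pitches.foldl (fun acc p => acc ++ [p + transposing_factor]) []
  match PySem.List.max? pitches (fun y => y) with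
  | none => result  -- Python: max([]) raises ValueError; unreachable under Pre_
  | some m => if m ≤ 11 then result.map (fun x => PySem.Int.mod x 12) else result

def intervals (pitches : List Int) (icclass : Bool) : List Int :=
  match PySem.List.max? pitches (fun y => y) with
  | none => []  -- Python: max([]) raises ValueError; unreachable under Pre_
  | some m =>
    if m ≤ 11 then
      if icclass then
        (PySem.List.pyRange 0 ((pitches.length : Int) - 1) 1).map
          (fun i => interval_class (PySem.List.pyGetD pitches (i + 1) 0) (PySem.List.pyGetD pitches i 0))
      else
        (PySem.List.pyRange 0 ((pitches.length : Int) - 1) 1).map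
          (fun i => PySem.Int.mod (PySem.List.pyGetD pitches (i + 1) 0 - PySem.List.pyGetD pitches i 0) 12)
    else
      (PySem.List.pyRange 0 ((pitches.length : Int) - 1) 1).map
        (fun i => PySem.List.pyGetD pitches (i + 1) 0 - PySem.List.pyGetD pitches i 0)

def start_sequence_pitches (first_pitch : Int) (interval_sequence : List Int) : List Int :=
  interval_sequence.foldl
    (fun new_sequence interval => new_sequence ++ [PySem.List.pyGetD new_sequence (-1) 0 + interval])
    [first_pitch]

def inversion (pitches : List Int) (factor : Int) : List Int :=
  match PySem.List.max? pitches (fun y => y) with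
  | none => []  -- Python: max([]) raises ValueError; unreachable under Pre_
  | some m =>
    if m ≤ 11 then
      transposition (pitches.map (fun pitch_class => PySem.Int.mod (12 - pitch_class) 12)) factor
    else
      start_sequence_pitches (PySem.List.pyGetD pitches 0 0)
        ((intervals pitches false).map (fun x => -x))

-- ===== PORT B =====
def inversion_alt (pitches : List Int) (factor : Int) : List Int :=
  match PySem.List.max? pitches (fun y => y) with
  | none => []  -- Python: max([]) raises ValueError; unreachable under Pre_
  | some m =>
    if m ≤ 11 then
      pitches.map (fun p => PySem.Int.mod (PySem.Int.mod (12 - p) 12 + factor) 12)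
    else
      pitches.map (fun p => 2 * PySem.List.pyGetD pitches 0 0 - p)

-- ===== PRECONDITION & SPEC =====
-- Pre_ excludes only the empty list, on which Python A raises ValueError (max of empty sequence).
def Pre_inversion (pitches : List Int) (factor : Int) : Prop := pitches ≠ []
instance (pitches : List Int) (factor : Int) : Decidable (Pre_inversion pitches factor) := by
  unfold Pre_inversion; infer_instance
def pvWitness_inversion : List Int × Int := ([60, 64, 67], 2)

def Spec_inversion (pitches : List Int) (factor : Int) (out : List Int) : Prop := out = inversion_alt pitches factor
instance (pitches : List Int) (factor : Int) (out : List Int) : Decidable (Spec_inversion pitches factor out) := by unfold Spec_inversion; infer_instance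

-- ===== CLAIM (what is proved, stated in full; the proofs are below) =====
def Claim_equal_inversion : Prop := ∀ (pitches : List Int) (factor : Int), Dom_inversion pitches factor → Pre_inversion pitches factor → Spec_inversion pitches factor (inversion pitches factor)

-- ===== LEMMAS AND PROOFS =====

-- successive differences pitches[i+1] - pitches[i], structurally
def adjDiffs : List Int → List Int
  | a :: b :: t => (b - a) :: adjDiffs (b :: t)
  | _ => []

lemma range_diffs_eq (xs : List Int) :
    (List.range (xs.length - 1)).map (fun k => xs.getD (k + 1) 0 - xs.getD k 0) = adjDiffs xs := by
  match xs with
  | [] => simp [adjDiffs]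
  | [a] => simp [adjDiffs]
  | a :: b :: t =>
    have ih := range_diffs_eq (b :: t)
    simp only [List.length_cons, Nat.add_sub_cancel] at ih ⊢
    rw [List.range_succ_eq_map]
    simp only [List.map_cons, List.map_map, adjDiffs, List.cons.injEq]
    refine ⟨by simp, ?_⟩
    rw [← ih]
    apply List.map_congr_left
    intro k _
    simp [Function.comp]

lemma diffs_eq (xs : List Int) :
    (PySem.List.pyRange 0 ((xs.length : Int) - 1) 1).map
      (fun i => PySem.List.pyGetD xs (i + 1) 0 - PySem.List.pyGetD xs i 0) = adjDiffs xs := by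
  rw [PySem.List.pyRange_one, List.map_map, ← range_diffs_eq xs]
  have hlen : (((xs.length : Int) - 1) - 0).toNat = xs.length - 1 := by omega
  rw [hlen]
  apply List.map_congr_left
  intro k _
  have h1 : (k : Int) + 1 = ((k + 1 : Nat) : Int) := by push_cast; ring
  simp only [Function.comp, zero_add, h1, PySem.List.pyGetD_natCast]

-- the rebuilt sequence, as a scan from the running last element
def scanG (a : Int) : List Int → List Int
  | [] => [a]
  | iv :: t => a :: scanG (a + iv) t

lemma start_fold (ivs : List Int) : ∀ (acc : List Int) (a : Int),
    ivs.foldl (fun seq iv => seq ++ [PySem.List.pyGetD seq (-1) 0 + iv]) (acc ++ [a]) =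
      acc ++ scanG a ivs := by
  induction ivs with
  | nil => intro acc a; simp [scanG]
  | cons iv t ih =>
    intro acc a
    simp only [List.foldl_cons, PySem.List.pyGetD_neg_one_append_singleton, scanG]
    rw [ih (acc ++ [a]) (a + iv)]
    simp

lemma scan_neg_adj : ∀ (t : List Int) (q c : Int),
    scanG c ((adjDiffs (q :: t)).map (fun x => -x)) = (q :: t).map (fun x => c + q - x) := by
  intro t
  induction t with
  | nil => intro q c; simp [adjDiffs, scanG]
  | cons r t ih =>
    intro q c
    simp only [adjDiffs, List.map_cons, scanG]
    rw [show c + -(r - q) = c + q - r by ring, ih r (c + q - r)]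
    simp only [List.map_cons, List.cons.injEq]
    refine ⟨by ring, by ring, List.map_congr_left ?_⟩
    intro x _
    ring

lemma mod12_le_11 (x : Int) : PySem.Int.mod x 12 ≤ 11 := by
  have := PySem.Int.mod_lt x (b := 12) (by norm_num)
  omega

theorem inversion_spec : Claim_equal_inversion := by
  intro pitches factor _ hpre
  unfold Spec_inversion inversion inversion_alt
  cases hmax : PySem.List.max? pitches (fun y => y) with
  | none => rfl
  | some m =>
    by_cases hm : m ≤ 11
    · simp only [if_pos hm]
      -- pitch-class branch: transposition of the mapped list
      unfold transposition
      have hne : pitches.map (fun pc => PySem.Int.mod (12 - pc) 12) ≠ [] := by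
        simpa using hpre
      cases hmax2 : PySem.List.max? (pitches.map (fun pc => PySem.Int.mod (12 - pc) 12)) (fun y => y) with
      | none => exact absurd ((PySem.List.max?_eq_none_iff _ _).mp hmax2) hne
      | some m2 =>
        have hm2 : m2 ≤ 11 := by
          have hmem := PySem.List.max?_mem hmax2
          obtain ⟨p, _, hp⟩ := List.mem_map.mp hmem
          rw [← hp]; exact mod12_le_11 _
        simp only [if_pos hm2]
        rw [PySem.List.foldl_append_singleton_eq_map]
        simp [List.map_map, Function.comp]
    · simp only [if_neg hm]
      -- MIDI branch
      obtain ⟨p, rest, rfl⟩ : ∃ p rest, pitches = p :: rest := by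
        cases pitches with
        | nil => exact absurd rfl hpre
        | cons p rest => exact ⟨p, rest, rfl⟩
      unfold intervals
      rw [hmax]
      simp only [if_neg hm, Bool.false_eq_true, diffs_eq]
      unfold start_sequence_pitches
      have h0 : PySem.List.pyGetD (p :: rest) 0 0 = p := PySem.List.pyGetD_zero_cons p rest 0
      rw [h0]
      have := start_fold ((adjDiffs (p :: rest)).map (fun x => -x)) [] p
      simp only [List.nil_append] at this
      rw [this, scan_neg_adj rest p p]
      apply List.map_congr_left
      intro x _
      ring
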